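-- pv_equiv track=rewrite | github.com/cinderlee/advent-of-code | day17/day17part2.py | simulate_cycles
-- ===== SOURCE A (Python) =====
-- def get_neighbors(i, j, k, l):
--     '''
--     Returns a list of neighbor coordinates given a
--     current location (i, j, k, l).
--     '''
--     neighbor_lst = []
--     for x in range(i - 1, i + 2):
--         for y in range(j - 1, j + 2):
--             for z in range(k - 1, k + 2):
--                 for w in range(l - 1, l + 2):
--                     if x == i and j == y and k == z and l == w:
--                         continue
--                     neighbor_lst.append((x, y, z, w))
--
--     return neighbor_lst
--
-- def get_updated_active_set(neighbor_counts, curr_active_set):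
--     '''
--     Returns a new set of active cubes. The current active set
--     and dictionary where the location key is mapped to number of
--     active neighbors are given.
--     '''
--     new_active_set = set()
--     for elem in neighbor_counts:
--         if elem in curr_active_set and (neighbor_counts[elem] == 2 or neighbor_counts[elem] == 3):
--             new_active_set.add(elem)
--         elif elem not in curr_active_set and neighbor_counts[elem] == 3:
--             new_active_set.add(elem)
--     return new_active_set
--
-- def simulate_cycles(active_set, num_cycles):
--     '''
--     Returns the set of active cubes after performing simulating
--     energy boot process.
--     '''
--     cycle_count = 0
--     while cycle_count < num_cycles:
--         neighbor_counts = {}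
--         for x, y, z, w in active_set:
--             neighbor_lst = get_neighbors(x, y, z, w)
--             for neighbor in neighbor_lst:
--                 if neighbor in neighbor_counts:
--                     neighbor_counts[neighbor] += 1
--                 else:
--                     neighbor_counts[neighbor] = 1
--
--         active_set = get_updated_active_set(neighbor_counts, active_set)
--         cycle_count += 1
--     return active_set
-- ===== SOURCE B (Python) =====
-- def get_neighbors(i, j, k, l):
--     '''
--     Returns a list of neighbor coordinates given a
--     current location (i, j, k, l).
--     '''
--     neighbor_lst = []
--     for x in range(i - 1, i + 2):
--         for y in range(j - 1, j + 2):
--             for z in range(k - 1, k + 2):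
--                 for w in range(l - 1, l + 2):
--                     if x == i and j == y and k == z and l == w:
--                         continue
--                     neighbor_lst.append((x, y, z, w))
--
--     return neighbor_lst
--
-- def simulate_cycles(active_set, num_cycles):
--     '''
--     Gather formulation: per cycle, the candidates are the (deduplicated)
--     neighbors of active cells; each candidate's live-neighbor count is
--     obtained by scanning its own neighborhood with membership tests.
--     '''
--     active = list(active_set)
--     for _ in range(num_cycles):
--         act = set(active)
--         candidates = list(dict.fromkeys(
--             nb for cell in active for nb in get_neighbors(*cell)))
--         nxt = []
--         for c in candidates:
--             cnt = sum(1 for nb in get_neighbors(*c) if nb in act)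
--             if (cnt == 2 or cnt == 3) if c in act else cnt == 3:
--                 nxt.append(c)
--         active = nxt
--     return active
-- ===== Notes on version B (the rewrite author's own statement) =====
-- stated objective: alternative
-- what changed: Replaces A's scatter step (accumulate a neighbor-count dict by spraying +1 from every active cell, then rescan the dict) by a gather step: build the deduplicated candidate list once, then decide each candidate by counting which of its own 80 neighbors are active via membership tests.
import Mathlib
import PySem

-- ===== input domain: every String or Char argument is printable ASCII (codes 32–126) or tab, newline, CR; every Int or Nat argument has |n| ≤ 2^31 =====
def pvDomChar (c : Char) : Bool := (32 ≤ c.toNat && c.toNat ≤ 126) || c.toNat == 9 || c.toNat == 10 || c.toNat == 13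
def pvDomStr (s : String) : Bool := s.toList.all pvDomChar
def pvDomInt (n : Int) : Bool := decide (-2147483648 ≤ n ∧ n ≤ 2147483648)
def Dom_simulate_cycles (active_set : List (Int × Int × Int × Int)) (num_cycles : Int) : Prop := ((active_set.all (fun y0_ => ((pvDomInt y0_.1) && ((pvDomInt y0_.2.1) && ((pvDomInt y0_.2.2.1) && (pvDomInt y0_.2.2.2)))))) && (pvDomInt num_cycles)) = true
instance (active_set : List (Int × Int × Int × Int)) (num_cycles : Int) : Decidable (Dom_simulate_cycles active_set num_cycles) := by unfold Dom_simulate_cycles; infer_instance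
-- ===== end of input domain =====

-- B replaces A's scatter step (a neighbor-count dict sprayed with +1 from every active
-- cell, then rescanned) by a gather step: dedup the candidate neighbors once, then decide
-- each candidate by counting its own active neighbors with membership tests (objective:
-- alternative decomposition, similar cost).

-- ===== PORT A =====
-- get_neighbors(i, j, k, l): four nested 'for … in range(c-1, c+2)' loops appending
-- every tuple except the center itself.
def get_neighbors (i j k l : Int) : List (Int × Int × Int × Int) :=
  (PySem.List.pyRange (i-1) (i+2) 1).foldl (fun acc x =>
    (PySem.List.pyRange (j-1) (j+2) 1).foldl (fun acc y =>
      (PySem.List.pyRange (k-1) (k+2) 1).foldl (fun acc z =>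
        (PySem.List.pyRange (l-1) (l+2) 1).foldl (fun acc w =>
          if x = i ∧ j = y ∧ k = z ∧ l = w then acc else acc ++ [(x, y, z, w)])
          acc) acc) acc) []

-- get_updated_active_set(neighbor_counts, curr_active_set): iterate the dict's keys in
-- insertion order; 'neighbor_counts[elem]' is the stored value (getD on a present key).
def get_updated_active_set (neighbor_counts : PySem.Dict (Int × Int × Int × Int) Int)
    (curr_active_set : List (Int × Int × Int × Int)) : List (Int × Int × Int × Int) :=
  neighbor_counts.keys.foldl (fun new_active_set elem =>
    if elem ∈ curr_active_set ∧ (neighbor_counts.getD elem 0 = 2 ∨ neighbor_counts.getD elem 0 = 3) then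
      PySem.Set.add new_active_set elem
    else if ¬ elem ∈ curr_active_set ∧ neighbor_counts.getD elem 0 = 3 then
      PySem.Set.add new_active_set elem
    else new_active_set) PySem.Set.empty

-- the body of A's while loop: build neighbor_counts, then update the active set
def pvStepA (active_set : List (Int × Int × Int × Int)) : List (Int × Int × Int × Int) :=
  get_updated_active_set
    (active_set.foldl (fun neighbor_counts c =>
      (get_neighbors c.1 c.2.1 c.2.2.1 c.2.2.2).foldl (fun neighbor_counts neighbor =>
        if neighbor_counts.contains neighbor then
          neighbor_counts.insert neighbor (neighbor_counts.getD neighbor 0 + 1)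
        else neighbor_counts.insert neighbor 1) neighbor_counts) PySem.Dict.empty)
    active_set

-- 'while cycle_count < num_cycles' with cycle_count counting 0,1,… is exactly
-- num_cycles.toNat iterations of the loop body.
def pvLoopA : Nat → List (Int × Int × Int × Int) → List (Int × Int × Int × Int)
  | 0, active_set => active_set
  | fuel + 1, active_set => pvLoopA fuel (pvStepA active_set)

def simulate_cycles (active_set : List (Int × Int × Int × Int)) (num_cycles : Int) : List (Int × Int × Int × Int) :=
  pvLoopA num_cycles.toNat active_set

-- ===== PORT B =====
-- body of B's loop: candidates = ordered dedup of all neighbors of active cells; keep a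
-- candidate by counting how many of its own neighbors are active ('act = set(active)' is
-- used for membership only, so membership in the list is the same test).
def pvStepB (active : List (Int × Int × Int × Int)) : List (Int × Int × Int × Int) :=
  let candidates := PySem.List.dedup (active.flatMap (fun c => get_neighbors c.1 c.2.1 c.2.2.1 c.2.2.2))
  candidates.filter (fun c =>
    let cnt := (get_neighbors c.1 c.2.1 c.2.2.1 c.2.2.2).countP (fun nb => decide (nb ∈ active))
    if c ∈ active then cnt == 2 || cnt == 3 else cnt == 3)

-- 'for _ in range(num_cycles)' = num_cycles.toNat iterations
def pvLoopB : Nat → List (Int × Int × Int × Int) → List (Int × Int × Int × Int)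
  | 0, active => active
  | fuel + 1, active => pvLoopB fuel (pvStepB active)

def simulate_cycles_alt (active_set : List (Int × Int × Int × Int)) (num_cycles : Int) : List (Int × Int × Int × Int) :=
  pvLoopB num_cycles.toNat active_set

-- ===== PRECONDITION & SPEC =====
-- Pre_ requires distinct cells: the argument stands for a Python set (its List encoding
-- holds the distinct elements), so a list with a duplicated cell is outside the domain.
def Pre_simulate_cycles (active_set : List (Int × Int × Int × Int)) (num_cycles : Int) : Prop :=
  active_set.Nodup
instance (active_set : List (Int × Int × Int × Int)) (num_cycles : Int) : Decidable (Pre_simulate_cycles active_set num_cycles) := by unfold Pre_simulate_cycles; infer_instance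

def pvWitness_simulate_cycles : (List (Int × Int × Int × Int)) × Int := ([(0, 0, 0, 0), (1, 0, 0, 0)], 1)

def Spec_simulate_cycles (active_set : List (Int × Int × Int × Int)) (num_cycles : Int) (out : List (Int × Int × Int × Int)) : Prop := out = simulate_cycles_alt active_set num_cycles
instance (active_set : List (Int × Int × Int × Int)) (num_cycles : Int) (out : List (Int × Int × Int × Int)) : Decidable (Spec_simulate_cycles active_set num_cycles out) := by unfold Spec_simulate_cycles; infer_instance

-- ===== CLAIM (what is proved, stated in full; the proofs are below) =====
def Claim_equal_simulate_cycles : Prop := ∀ (active_set : List (Int × Int × Int × Int)) (num_cycles : Int), Dom_simulate_cycles active_set num_cycles → Pre_simulate_cycles active_set num_cycles → Spec_simulate_cycles active_set num_cycles (simulate_cycles active_set num_cycles)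

-- ===== LEMMAS AND PROOFS =====

-- get_neighbors as a flatMap/filter comprehension
theorem foldl_w (i j k l x y z : Int) (acc : List (Int × Int × Int × Int)) :
    (PySem.List.pyRange (l-1) (l+2) 1).foldl (fun acc w =>
        if x = i ∧ j = y ∧ k = z ∧ l = w then acc else acc ++ [(x, y, z, w)]) acc
      = acc ++ ((PySem.List.pyRange (l-1) (l+2) 1).filter
          (fun w => decide (¬ (x = i ∧ j = y ∧ k = z ∧ l = w)))).map (fun w => (x, y, z, w)) := by
  rw [PySem.List.foldl_congr_mem _ _
    (fun acc w => if ¬ (x = i ∧ j = y ∧ k = z ∧ l = w) then acc ++ [(x, y, z, w)] else acc) _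
    (by intro acc w _; by_cases h : x = i ∧ j = y ∧ k = z ∧ l = w <;> simp [h])]
  exact PySem.List.foldl_append_ite _ _ _ _

theorem foldl_z (i j k l x y : Int) (acc : List (Int × Int × Int × Int)) :
    (PySem.List.pyRange (k-1) (k+2) 1).foldl (fun acc z =>
      (PySem.List.pyRange (l-1) (l+2) 1).foldl (fun acc w =>
        if x = i ∧ j = y ∧ k = z ∧ l = w then acc else acc ++ [(x, y, z, w)]) acc) acc
      = acc ++ (PySem.List.pyRange (k-1) (k+2) 1).flatMap (fun z =>
          ((PySem.List.pyRange (l-1) (l+2) 1).filter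
            (fun w => decide (¬ (x = i ∧ j = y ∧ k = z ∧ l = w)))).map (fun w => (x, y, z, w))) := by
  rw [PySem.List.foldl_congr_mem _ _
    (fun acc z => acc ++ ((PySem.List.pyRange (l-1) (l+2) 1).filter
            (fun w => decide (¬ (x = i ∧ j = y ∧ k = z ∧ l = w)))).map (fun w => (x, y, z, w))) _
    (by intro acc z _; exact foldl_w i j k l x y z acc)]
  exact PySem.List.foldl_append_eq_flatMap _ _ _

theorem foldl_y (i j k l x : Int) (acc : List (Int × Int × Int × Int)) :
    (PySem.List.pyRange (j-1) (j+2) 1).foldl (fun acc y =>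
      (PySem.List.pyRange (k-1) (k+2) 1).foldl (fun acc z =>
        (PySem.List.pyRange (l-1) (l+2) 1).foldl (fun acc w =>
          if x = i ∧ j = y ∧ k = z ∧ l = w then acc else acc ++ [(x, y, z, w)]) acc) acc) acc
      = acc ++ (PySem.List.pyRange (j-1) (j+2) 1).flatMap (fun y =>
          (PySem.List.pyRange (k-1) (k+2) 1).flatMap (fun z =>
            ((PySem.List.pyRange (l-1) (l+2) 1).filter
              (fun w => decide (¬ (x = i ∧ j = y ∧ k = z ∧ l = w)))).map (fun w => (x, y, z, w)))) := by
  rw [PySem.List.foldl_congr_mem _ _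
    (fun acc y => acc ++ (PySem.List.pyRange (k-1) (k+2) 1).flatMap (fun z =>
            ((PySem.List.pyRange (l-1) (l+2) 1).filter
              (fun w => decide (¬ (x = i ∧ j = y ∧ k = z ∧ l = w)))).map (fun w => (x, y, z, w)))) _
    (by intro acc y _; exact foldl_z i j k l x y acc)]
  exact PySem.List.foldl_append_eq_flatMap _ _ _

theorem get_neighbors_eq (i j k l : Int) :
    get_neighbors i j k l =
      (PySem.List.pyRange (i-1) (i+2) 1).flatMap (fun x =>
        (PySem.List.pyRange (j-1) (j+2) 1).flatMap (fun y =>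
          (PySem.List.pyRange (k-1) (k+2) 1).flatMap (fun z =>
            ((PySem.List.pyRange (l-1) (l+2) 1).filter
              (fun w => decide (¬ (x = i ∧ j = y ∧ k = z ∧ l = w)))).map (fun w => (x, y, z, w))))) := by
  unfold get_neighbors
  rw [PySem.List.foldl_congr_mem _ _
    (fun acc x => acc ++ (PySem.List.pyRange (j-1) (j+2) 1).flatMap (fun y =>
          (PySem.List.pyRange (k-1) (k+2) 1).flatMap (fun z =>
            ((PySem.List.pyRange (l-1) (l+2) 1).filter
              (fun w => decide (¬ (x = i ∧ j = y ∧ k = z ∧ l = w)))).map (fun w => (x, y, z, w))))) _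
    (by intro acc x _; exact foldl_y i j k l x acc)]
  rw [PySem.List.foldl_append_eq_flatMap, List.nil_append]

theorem mem_get_neighbors (i j k l a b c d : Int) :
    (a, b, c, d) ∈ get_neighbors i j k l ↔
      (i - 1 ≤ a ∧ a < i + 2) ∧ (j - 1 ≤ b ∧ b < j + 2) ∧ (k - 1 ≤ c ∧ c < k + 2) ∧
      (l - 1 ≤ d ∧ d < l + 2) ∧ ¬ (a = i ∧ b = j ∧ c = k ∧ d = l) := by
  rw [get_neighbors_eq]
  simp only [List.mem_flatMap, List.mem_map, List.mem_filter, PySem.List.mem_pyRange_one,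
    Prod.mk.injEq, decide_eq_true_eq]
  constructor
  · rintro ⟨x, hx, y, hy, z, hz, w, ⟨hw, hne⟩, rfl, rfl, rfl, rfl⟩
    refine ⟨hx, hy, hz, hw, ?_⟩
    tauto
  · rintro ⟨ha, hb, hc, hd, hne⟩
    exact ⟨a, ha, b, hb, c, hc, d, ⟨hd, by tauto⟩, rfl, rfl, rfl, rfl⟩

theorem get_neighbors_symm (i j k l a b c d : Int) :
    ((a, b, c, d) ∈ get_neighbors i j k l) ↔ ((i, j, k, l) ∈ get_neighbors a b c d) := by
  rw [mem_get_neighbors, mem_get_neighbors]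
  omega

theorem nodup_get_neighbors (i j k l : Int) : (get_neighbors i j k l).Nodup := by
  rw [get_neighbors_eq, List.nodup_flatMap]
  refine ⟨fun x _ => ?_, ?_⟩
  · rw [List.nodup_flatMap]
    refine ⟨fun y _ => ?_, ?_⟩
    · rw [List.nodup_flatMap]
      refine ⟨fun z _ => ?_, ?_⟩
      · exact ((PySem.List.nodup_pyRange_one _ _).filter _).map
          (by intro w w' h; simpa using h)
      · refine ((PySem.List.nodup_pyRange_one _ _).imp ?_)
        intro z z' hzz' t ht ht'
        simp only [List.mem_map, List.mem_filter] at ht ht'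
        obtain ⟨w, _, rfl⟩ := ht
        obtain ⟨w', _, h⟩ := ht'
        simp only [Prod.mk.injEq] at h
        exact hzz' h.2.2.1.symm
    · refine ((PySem.List.nodup_pyRange_one _ _).imp ?_)
      intro y y' hyy' t ht ht'
      simp only [List.mem_flatMap, List.mem_map, List.mem_filter] at ht ht'
      obtain ⟨z, _, w, _, rfl⟩ := ht
      obtain ⟨z', _, w', _, h⟩ := ht'
      simp only [Prod.mk.injEq] at h
      exact hyy' h.2.1.symm
  · refine ((PySem.List.nodup_pyRange_one _ _).imp ?_)
    intro x x' hxx' t ht ht'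
    simp only [List.mem_flatMap, List.mem_map, List.mem_filter] at ht ht'
    obtain ⟨y, _, z, _, w, _, rfl⟩ := ht
    obtain ⟨y', _, z', _, w', _, h⟩ := ht'
    simp only [Prod.mk.injEq] at h
    exact hxx' h.1.symm

-- counting in either direction across the symmetric neighbor relation
theorem countP_mem_comm (l m : List (Int × Int × Int × Int)) (hl : l.Nodup) (hm : m.Nodup) :
    l.countP (fun x => decide (x ∈ m)) = m.countP (fun x => decide (x ∈ l)) := by
  rw [List.countP_eq_length_filter, List.countP_eq_length_filter]
  refine List.Perm.length_eq ?_
  refine (List.perm_ext_iff_of_nodup (hl.filter _) (hm.filter _)).2 ?_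
  intro a
  simp only [List.mem_filter, decide_eq_true_eq]
  exact and_comm

-- A's count dict is the Counter of the flattened neighbor list
theorem countDict_eq_counter (active : List (Int × Int × Int × Int)) :
    (active.foldl (fun neighbor_counts c =>
      (get_neighbors c.1 c.2.1 c.2.2.1 c.2.2.2).foldl (fun neighbor_counts neighbor =>
        if neighbor_counts.contains neighbor then
          neighbor_counts.insert neighbor (neighbor_counts.getD neighbor 0 + 1)
        else neighbor_counts.insert neighbor 1) neighbor_counts) PySem.Dict.empty)
    = PySem.Dict.counter (active.flatMap (fun c => get_neighbors c.1 c.2.1 c.2.2.1 c.2.2.2)) := by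
  rw [← PySem.Dict.foldl_insert_getD_add_one_eq_counter, List.foldl_flatMap]
  refine PySem.List.foldl_congr_mem _ _ _ _ ?_
  intro acc c _
  refine PySem.List.foldl_congr_mem _ _ _ _ ?_
  intro d nb _
  by_cases h : d.contains nb
  · simp [h]
  · rw [if_neg h, PySem.Dict.getD_of_not_contains _ _ (by simpa using h)]
    norm_num

-- folding Set.add over a nodup list of fresh elements is filtering
theorem foldl_add_ite_eq_filter (p : (Int × Int × Int × Int) → Prop) [DecidablePred p]
    (l acc : List (Int × Int × Int × Int)) (hl : l.Nodup) (hfresh : ∀ x ∈ l, x ∉ acc) :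
    l.foldl (fun s x => if p x then PySem.Set.add s x else s) acc
      = acc ++ l.filter (fun x => decide (p x)) := by
  induction l generalizing acc with
  | nil => simp
  | cons x t ih =>
    rw [List.nodup_cons] at hl
    have hx : x ∉ acc := hfresh x (by simp)
    simp only [List.foldl_cons]
    by_cases hp : p x
    · have hadd : PySem.Set.add acc x = acc ++ [x] := by
        simp [PySem.Set.add, PySem.Set.contains, hx]
      have hfresh' : ∀ y ∈ t, y ∉ acc ++ [x] := by
        intro y hy hmem
        rcases (by simpa using hmem : y ∈ acc ∨ y = x) with hya | rfl
        · exact hfresh y (by simp [hy]) hya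
        · exact hl.1 hy
      rw [if_pos hp, hadd, ih (acc ++ [x]) hl.2 hfresh']
      simp [hp]
    · rw [if_neg hp, ih acc hl.2 (fun y hy => hfresh y (by simp [hy]))]
      simp [hp]

-- the multiplicity of c in the flattened neighbor list = B's membership count at c
theorem count_flat_eq_countP (active : List (Int × Int × Int × Int)) (hnd : active.Nodup)
    (c : Int × Int × Int × Int) :
    (active.flatMap (fun c => get_neighbors c.1 c.2.1 c.2.2.1 c.2.2.2)).count c
      = (get_neighbors c.1 c.2.1 c.2.2.1 c.2.2.2).countP (fun nb => decide (nb ∈ active)) := by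
  have h1 : (active.flatMap (fun a => get_neighbors a.1 a.2.1 a.2.2.1 a.2.2.2)).count c
      = active.countP (fun a => decide (a ∈ get_neighbors c.1 c.2.1 c.2.2.1 c.2.2.2)) := by
    induction active with
    | nil => simp
    | cons a t ih =>
      rw [List.nodup_cons] at hnd
      rw [List.flatMap_cons, List.count_append, List.countP_cons, ih hnd.2]
      by_cases h : c ∈ get_neighbors a.1 a.2.1 a.2.2.1 a.2.2.2
      · have hsym : a ∈ get_neighbors c.1 c.2.1 c.2.2.1 c.2.2.2 := by
          have := (get_neighbors_symm a.1 a.2.1 a.2.2.1 a.2.2.2 c.1 c.2.1 c.2.2.1 c.2.2.2).1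
          simpa using this (by simpa using h)
        rw [List.count_eq_one_of_mem (nodup_get_neighbors _ _ _ _) h]
        simp [hsym]
        omega
      · have hsym : a ∉ get_neighbors c.1 c.2.1 c.2.2.1 c.2.2.2 := by
          intro hmem
          exact h (by
            have := (get_neighbors_symm a.1 a.2.1 a.2.2.1 a.2.2.2 c.1 c.2.1 c.2.2.1 c.2.2.2).2
            simpa using this (by simpa using hmem))
        rw [List.count_eq_zero.2 h]
        simp [hsym]
  rw [h1, countP_mem_comm _ _ hnd (nodup_get_neighbors _ _ _ _)]

theorem step_eq (active : List (Int × Int × Int × Int)) (hnd : active.Nodup) :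
    pvStepA active = pvStepB active := by
  unfold pvStepA pvStepB get_updated_active_set
  rw [countDict_eq_counter, PySem.Dict.keys_counter]
  simp only [PySem.List.dedup_eq_ofList]
  rw [PySem.List.foldl_congr_mem _ _
      (fun s elem =>
        if (elem ∈ active ∧
              (((active.flatMap (fun c => get_neighbors c.1 c.2.1 c.2.2.1 c.2.2.2)).count elem : Int) = 2 ∨
               ((active.flatMap (fun c => get_neighbors c.1 c.2.1 c.2.2.1 c.2.2.2)).count elem : Int) = 3)) ∨
           (¬ elem ∈ active ∧
              ((active.flatMap (fun c => get_neighbors c.1 c.2.1 c.2.2.1 c.2.2.2)).count elem : Int) = 3)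
        then PySem.Set.add s elem else s) _ ?_]
  · rw [foldl_add_ite_eq_filter _ _ _ (PySem.Set.nodup_ofList _) (by intro x _; simp [PySem.Set.empty])]
    show PySem.Set.empty ++ _ = _
    rw [show (PySem.Set.empty : List (Int × Int × Int × Int)) = [] from rfl, List.nil_append]
    refine List.filter_congr ?_
    intro x _
    have hc := count_flat_eq_countP active hnd x
    set n := (get_neighbors x.1 x.2.1 x.2.2.1 x.2.2.2).countP (fun nb => decide (nb ∈ active)) with hn
    have e2 : (((n : Int)) = 2) = (n = 2) := propext (by omega)
    have e3 : (((n : Int)) = 3) = (n = 3) := propext (by omega)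
    by_cases hm : x ∈ active <;> by_cases h2 : n = 2 <;> by_cases h3 : n = 3 <;>
      simp [hm, hc, h2, h3, e2, e3]
  · intro s elem _
    rw [PySem.Dict.getD_counter]
    simp only []
    split_ifs <;> tauto

theorem nodup_stepB (active : List (Int × Int × Int × Int)) : (pvStepB active).Nodup := by
  unfold pvStepB
  simp only [PySem.List.dedup_eq_ofList]
  exact (PySem.Set.nodup_ofList _).filter _

theorem loop_eq (fuel : Nat) (active : List (Int × Int × Int × Int)) (hnd : active.Nodup) :
    pvLoopA fuel active = pvLoopB fuel active := by
  induction fuel generalizing active with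
  | zero => rfl
  | succ f ih =>
    show pvLoopA f (pvStepA active) = pvLoopB f (pvStepB active)
    rw [step_eq active hnd]
    exact ih (pvStepB active) (nodup_stepB active)

-- ===== VERDICT (by name: the statement is the Claim_ definition above) =====
theorem simulate_cycles_spec : Claim_equal_simulate_cycles := by
  intro active_set num_cycles _ hpre
  exact loop_eq num_cycles.toNat active_set hpre
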